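-- pv_equiv track=rewrite | github.com/newtomsoft/Puzzles-Solver | GridProviders/GridPuzzle/Base/GridPuzzleCanvasProvider.py | _split_to_list2
-- ===== SOURCE A (Python) =====
-- def _split_to_list2(input_list: list[str]) -> list[int]:
--     result = []
--     current_sublist = []
--
--     for item in input_list:
--         if item == '$':
--             if current_sublist:
--                 result.append(current_sublist)
--                 current_sublist = []
--         elif item != '|':
--             current_sublist.append(int(item))
--
--     if current_sublist:
--         result.append(current_sublist)
--
--     return result
-- ===== SOURCE B (Python) =====
-- def _split_to_list2(input_list: list[str]) -> list[int]:
--     filtered = [t for t in input_list if t != '|']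
--     result = []
--     i, n = 0, len(filtered)
--     while i < n:
--         if filtered[i] == '$':
--             i += 1
--             continue
--         j = i
--         while j < n and filtered[j] != '$':
--             j += 1
--         result.append([int(t) for t in filtered[i:j]])
--         i = j
--     return result
-- ===== Notes on version B (the rewrite author's own statement) =====
-- stated objective: alternative
-- what changed: Replaces the stateful accumulate/flush loop with a filter pass dropping '|' followed by a span scan that slices out each maximal run of non-'$' tokens and int-converts it as a group.
import Mathlib
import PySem

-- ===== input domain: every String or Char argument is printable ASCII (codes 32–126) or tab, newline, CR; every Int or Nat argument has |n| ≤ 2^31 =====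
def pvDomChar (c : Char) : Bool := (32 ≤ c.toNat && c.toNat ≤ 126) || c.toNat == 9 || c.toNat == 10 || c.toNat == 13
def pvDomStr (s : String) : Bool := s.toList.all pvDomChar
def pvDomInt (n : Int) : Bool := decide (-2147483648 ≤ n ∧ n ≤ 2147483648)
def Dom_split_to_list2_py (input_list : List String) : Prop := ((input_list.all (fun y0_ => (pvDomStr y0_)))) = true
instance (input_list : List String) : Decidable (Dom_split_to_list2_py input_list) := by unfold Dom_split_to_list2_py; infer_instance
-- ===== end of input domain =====

-- B replaces A's stateful accumulate/flush loop by a filter pass (dropping '|') plus a span scan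
-- slicing each maximal run of non-'$' tokens into an int group (objective: alternative).


-- int(item); under Pre_ the parse always succeeds, the default is never used
def pvToInt (s : String) : Int := (PySem.Int.ofStr? s).getD 0

-- ===== PORT A =====
-- A's loop body: flush current sublist on '$', skip '|', otherwise append int(item)
def pvStepA (st : List (List Int) × List Int) (item : String) : List (List Int) × List Int :=
  if item = "$" then
    if st.2 ≠ [] then (st.1 ++ [st.2], []) else st
  else if item ≠ "|" then (st.1, st.2 ++ [pvToInt item])
  else st

def split_to_list2_py (input_list : List String) : List (List Int) :=
  let st := input_list.foldl pvStepA ([], [])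
  if st.2 ≠ [] then st.1 ++ [st.2] else st.1

-- ===== PORT B =====
-- span scan over the filtered tokens: skip a '$', else slice out the maximal non-'$' run
def pvGroupsB : List String → List (List String)
  | [] => []
  | x :: rest =>
    if x = "$" then pvGroupsB rest
    else (x :: rest.takeWhile (· ≠ "$")) :: pvGroupsB (rest.dropWhile (· ≠ "$"))
termination_by m => m.length
decreasing_by
  · simp
  · have := List.length_dropWhile_le (p := fun x => !decide (x = "$")) (l := rest)
    simp; omega

def split_to_list2_py_alt (input_list : List String) : List (List Int) :=
  (pvGroupsB (input_list.filter (· ≠ "|"))).map (fun g => g.map pvToInt)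

-- ===== PRECONDITION & SPEC =====
-- A raises ValueError when a token other than '$'/'|' is not int-parsable; Pre_ excludes exactly that
def Pre_split_to_list2_py (input_list : List String) : Prop :=
  (input_list.all (fun s => s == "$" || s == "|" || (PySem.Int.ofStr? s).isSome)) = true
instance (input_list : List String) : Decidable (Pre_split_to_list2_py input_list) := by
  unfold Pre_split_to_list2_py; infer_instance
def pvWitness_split_to_list2_py : List String := ["1", "$", "2", "|", "-3"]

def Spec_split_to_list2_py (input_list : List String) (out : List (List Int)) : Prop :=
  out = split_to_list2_py_alt input_list
instance (input_list : List String) (out : List (List Int)) : Decidable (Spec_split_to_list2_py input_list out) := by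
  unfold Spec_split_to_list2_py; infer_instance

-- ===== CLAIM (what is proved, stated in full; the proofs are below) =====
def Claim_equal_split_to_list2_py : Prop := ∀ (input_list : List String), Dom_split_to_list2_py input_list → Pre_split_to_list2_py input_list → Spec_split_to_list2_py input_list (split_to_list2_py input_list)

-- ===== LEMMAS AND PROOFS =====

-- A's groups-with-pending-current-sublist recursion, used only to state the invariant
def pvGrpC : List Int → List String → List (List Int)
  | cur, [] => if cur = [] then [] else [cur]
  | cur, x :: rest =>
    if x = "$" then (if cur = [] then [] else [cur]) ++ pvGrpC [] rest
    else pvGrpC (cur ++ [pvToInt x]) rest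

theorem pvStepA_bar (st : List (List Int) × List Int) : pvStepA st "|" = st := by
  simp [pvStepA]

-- the '|' tokens are no-ops for A's fold
theorem foldl_stepA_filter (l : List String) (st : List (List Int) × List Int) :
    l.foldl pvStepA st = (l.filter (· ≠ "|")).foldl pvStepA st := by
  induction l generalizing st with
  | nil => rfl
  | cons x r ih =>
    by_cases hx : x = "|"
    · subst hx; simpa [pvStepA_bar] using ih st
    · simp [List.filter, hx, List.foldl, ih]

-- invariant for A's fold, against the pending-current recursion
theorem foldl_stepA_grpC (m : List String) (hbar : "|" ∉ m) (res : List (List Int)) (cur : List Int) :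
    (let st := m.foldl pvStepA (res, cur)
     if st.2 ≠ [] then st.1 ++ [st.2] else st.1) = res ++ pvGrpC cur m := by
  induction m generalizing res cur with
  | nil =>
    by_cases h : cur = [] <;> simp [pvGrpC, h]
  | cons x r ih =>
    have hb : x ≠ "|" := fun h => hbar (by simp [h])
    have hr : "|" ∉ r := fun h => hbar (by simp [h])
    by_cases hx : x = "$"
    · subst hx
      by_cases hc : cur = [] <;>
        simp [List.foldl, pvStepA, pvGrpC, hc, ih hr]
    · simpa [List.foldl, pvStepA, pvGrpC, hx, hb] using ih hr res (cur ++ [pvToInt x])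

-- a nonempty pending sublist closes at the next '$' (or the end)
theorem grpC_push (rest : List String) (cur : List Int) (h : cur ≠ []) :
    pvGrpC cur rest =
      (cur ++ (rest.takeWhile (· ≠ "$")).map pvToInt) :: pvGrpC [] (rest.dropWhile (· ≠ "$")) := by
  induction rest generalizing cur with
  | nil => simp [pvGrpC, h]
  | cons x r ih =>
    by_cases hx : x = "$"
    · subst hx; simp [pvGrpC, h, List.takeWhile, List.dropWhile]
    · simp [pvGrpC, hx, List.takeWhile, List.dropWhile, ih (cur ++ [pvToInt x]) (by simp)]

-- A's pending-current recursion from the empty state is B's span scan, int-converted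
theorem grpC_eq_groupsB (m : List String) :
    pvGrpC [] m = (pvGroupsB m).map (fun g => g.map pvToInt) := by
  match m with
  | [] => simp [pvGrpC, pvGroupsB]
  | x :: r =>
    by_cases hx : x = "$"
    · subst hx
      simp [pvGrpC, pvGroupsB, grpC_eq_groupsB r]
    · rw [pvGroupsB]
      simp only [hx, ite_false]
      rw [pvGrpC]
      simp only [hx, ite_false, List.nil_append]
      rw [grpC_push r [pvToInt x] (by simp)]
      simp only [List.map_cons, List.singleton_append]
      rw [grpC_eq_groupsB (List.dropWhile (fun x => decide (x ≠ "$")) r)]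
termination_by m.length
decreasing_by
  · simp
  · have := List.length_dropWhile_le (p := fun x => decide (x ≠ "$")) (l := r)
    simp at this ⊢; omega

-- ===== VERDICT (by name: the statement is the Claim_ definition above) =====
theorem split_to_list2_py_spec : Claim_equal_split_to_list2_py := by
  intro l _ _
  unfold Spec_split_to_list2_py split_to_list2_py split_to_list2_py_alt
  rw [foldl_stepA_filter]
  have hbar : "|" ∉ l.filter (· ≠ "|") := by simp
  simpa using (foldl_stepA_grpC (l.filter (· ≠ "|")) hbar [] []).trans
    (by simp [grpC_eq_groupsB])
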